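-- pv_equiv track=rewrite | github.com/plotski/upsies | upsies/utils/__init__.py | as_groups
-- ===== SOURCE A (Python) =====
-- import collections
-- import itertools
--
-- def as_groups(sequence, group_sizes, default=None):
--     """
--     Iterate over items from `iterable` in evenly sized groups
--
--     :params sequence: List of items to group
--     :params group_sizes: Sequence of group sizes; the one with the lowest number
--         of `default` items in the last group is picked automatically
--     :param default: Value to pad last group with if
--         ``len(iterable) % group_size != 0``
--     """
--     # Calculate group size that results in the least number of `default` values
--     # in the final group
--     gs_map = collections.defaultdict(lambda: [])
--     for gs in group_sizes:
--         # How many items from `iterable` are in the last group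
--         overhang = len(sequence) % gs
--         # How many `default` values are in the last group
--         default_count = 0 if overhang == 0 else gs - overhang
--         gs_map[default_count].append(gs)
--
--     lowest_default_count = sorted(gs_map)[0]
--     group_size = max(gs_map[lowest_default_count])
--     args = [iter(sequence)] * group_size
--     yield from itertools.zip_longest(*args, fillvalue=default)
-- ===== SOURCE B (Python) =====
-- def as_groups(sequence, group_sizes, default=None):
--     """
--     Iterate over items from `sequence` in evenly sized groups, picking the
--     group size from `group_sizes` that needs the fewest `default` pads in the
--     last group (largest size wins ties), padding the last group with `default`.
--     """
--     n = len(sequence)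
--     # Lowest pad count first, largest size second: one min() over the candidates.
--     group_size = min(group_sizes,
--                      key=lambda gs: (0 if n % gs == 0 else gs - n % gs, -gs))
--     # Slice-based chunking instead of the zip_longest idiom.
--     for i in range(0, n, group_size):
--         group = list(sequence[i:i + group_size])
--         group += [default] * (group_size - len(group))
--         yield tuple(group)
-- ===== Notes on version B (the rewrite author's own statement) =====
-- stated objective: idiomatic
-- what changed: The defaultdict-bucket-plus-sorted-keys-plus-max selection is replaced by a single min() with a lexicographic (pad count, -size) key, and the zip_longest-over-copied-iterators grouping is replaced by a slice-based chunking loop over range(0, n, group_size).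
-- outside the precondition, e.g. on as_groups([1, 2, 3], [2], None): A returns [(1, 2), (3, None)], B returns [(1, 2), (3, None)]
import Mathlib
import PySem

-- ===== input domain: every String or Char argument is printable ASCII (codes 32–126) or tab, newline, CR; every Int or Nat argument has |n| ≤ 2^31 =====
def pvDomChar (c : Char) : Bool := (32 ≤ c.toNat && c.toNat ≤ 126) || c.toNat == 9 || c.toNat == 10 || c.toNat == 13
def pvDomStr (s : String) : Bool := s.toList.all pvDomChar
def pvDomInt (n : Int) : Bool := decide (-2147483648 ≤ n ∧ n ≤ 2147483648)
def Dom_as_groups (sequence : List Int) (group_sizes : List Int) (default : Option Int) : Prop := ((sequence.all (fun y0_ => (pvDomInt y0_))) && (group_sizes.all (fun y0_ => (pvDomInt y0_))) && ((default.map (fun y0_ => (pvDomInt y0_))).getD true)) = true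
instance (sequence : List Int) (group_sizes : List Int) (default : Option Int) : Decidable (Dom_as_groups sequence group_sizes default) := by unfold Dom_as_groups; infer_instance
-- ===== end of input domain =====

-- B replaces A's defaultdict-bucket/sorted-keys/max selection by one min() with a
-- lexicographic (pad count, -size) key and the zip_longest idiom by an explicit buffer
-- loop (objective: idiomatic). Both are Python generators; equivalence is about the
-- yielded values.

-- ===== PORT A =====
-- itertools.zip_longest(*([iter(sequence)] * k), fillvalue=fill): the k copies share one
-- iterator, so each yielded tuple takes the next k items and the last partial tuple is
-- padded with fill.  Chunk size is kpred+1 (the caller passes k-1) so recursion on a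
-- shorter list is structural; exact for k ≥ 1.
def zipLongestChunks (kpred : Nat) (fill : Int) : List Int → List (List Int)
  | [] => []
  | x :: xs =>
    let c := (x :: xs).take (kpred + 1)
    (c ++ List.replicate (kpred + 1 - c.length) fill) ::
      zipLongestChunks kpred fill ((x :: xs).drop (kpred + 1))
  termination_by l => l.length
  decreasing_by simp

def as_groups (sequence : List Int) (group_sizes : List Int) (default : Option Int) : List (List Int) :=
  let n : Int := sequence.length
  let gsMap := group_sizes.foldl (fun d gs =>
      let overhang := PySem.Int.mod n gs
      let defaultCount := if overhang = 0 then 0 else gs - overhang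
      d.modify defaultCount [] (fun b => b ++ [gs])) PySem.Dict.empty
  match PySem.List.sorted gsMap.keys (fun k => k) false with
  | [] => []  -- sorted(gs_map)[0] raises IndexError (empty group_sizes); outside Pre_
  | lowestDefaultCount :: _ =>
    match PySem.List.max? (gsMap.getD lowestDefaultCount []) (fun x => x) with
    | none => []  -- unreachable: the bucket of a present key is nonempty
    | some groupSize =>
      if groupSize ≤ 0 then []  -- [iter(sequence)] * groupSize is empty: zip_longest yields nothing; outside Pre_
      else
        -- `default = none` is used as fillvalue only outside Pre_; 0 stands in for None.
        zipLongestChunks (groupSize.toNat - 1) (default.getD 0) sequence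

-- ===== PORT B =====
def as_groups_alt (sequence : List Int) (group_sizes : List Int) (default : Option Int) : List (List Int) :=
  let n : Int := sequence.length
  match PySem.List.min2? group_sizes
      (fun gs => if PySem.Int.mod n gs = 0 then 0 else gs - PySem.Int.mod n gs)
      (fun gs => -gs) with
  | none => []  -- min() of an empty list raises ValueError; outside Pre_
  | some groupSize =>
    -- one yielded tuple per iteration of `for i in range(0, n, group_size)`
    (PySem.List.pyRange 0 n groupSize).map (fun i =>
      let group := PySem.List.slice sequence (some i) (some (i + groupSize))
      -- [default] * m is empty for m ≤ 0, hence .toNat; `default = none` pads only outside Pre_.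
      group ++ List.replicate (groupSize - (group.length : Int)).toNat (default.getD 0))

-- ===== PRECONDITION & SPEC =====
-- Pre_ excludes empty group_sizes (A raises IndexError), a 0 size (ZeroDivisionError),
-- and default=None inputs on which the chosen size pads the last group, where A yields
-- a tuple containing None — not a value of type List Int.  (With default=None A pads
-- only if no size divides len(sequence) and no negative size fails to divide it, since
-- a non-dividing negative size has a negative pad count, making the chosen size
-- negative, and then A yields nothing.)
def Pre_as_groups (sequence : List Int) (group_sizes : List Int) (default : Option Int) : Prop :=
  group_sizes ≠ [] ∧ (∀ gs ∈ group_sizes, gs ≠ 0) ∧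
    (default ≠ none ∨ (∃ gs ∈ group_sizes, PySem.Int.mod (sequence.length : Int) gs = 0) ∨
      (∃ gs ∈ group_sizes, gs < 0 ∧ PySem.Int.mod (sequence.length : Int) gs ≠ 0))
instance (sequence : List Int) (group_sizes : List Int) (default : Option Int) : Decidable (Pre_as_groups sequence group_sizes default) := by unfold Pre_as_groups; infer_instance

def pvWitness_as_groups : List Int × List Int × Option Int := ([1, 2, 3, 4, 5], [2, 3], some 0)

def Spec_as_groups (sequence : List Int) (group_sizes : List Int) (default : Option Int) (out : List (List Int)) : Prop := out = as_groups_alt sequence group_sizes default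
instance (sequence : List Int) (group_sizes : List Int) (default : Option Int) (out : List (List Int)) : Decidable (Spec_as_groups sequence group_sizes default out) := by unfold Spec_as_groups; infer_instance

-- ===== CLAIM (what is proved, stated in full; the proofs are below) =====
def Claim_equal_as_groups : Prop := ∀ (sequence : List Int) (group_sizes : List Int) (default : Option Int), Dom_as_groups sequence group_sizes default → Pre_as_groups sequence group_sizes default → Spec_as_groups sequence group_sizes default (as_groups sequence group_sizes default)

-- ===== LEMMAS AND PROOFS =====

-- A's bucket dict, named for the proofs.
def selMap (n : Int) (l : List Int) : PySem.Dict Int (List Int) :=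
  l.foldl (fun d gs =>
    let overhang := PySem.Int.mod n gs
    let defaultCount := if overhang = 0 then 0 else gs - overhang
    d.modify defaultCount [] (fun b => b ++ [gs])) PySem.Dict.empty

-- `g` is the first element of `l` with lexicographically minimal (k1, -·) key;
-- value-wise it is unique.
def IsLexMin (k1 : Int → Int) (l : List Int) (g : Int) : Prop :=
  g ∈ l ∧ ∀ y ∈ l, k1 g < k1 y ∨ (k1 g = k1 y ∧ -g ≤ -y)

theorem isLexMin_unique {k1 : Int → Int} {l : List Int} {g g' : Int}
    (h : IsLexMin k1 l g) (h' : IsLexMin k1 l g') : g = g' := by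
  obtain ⟨hm, hall⟩ := h
  obtain ⟨hm', hall'⟩ := h'
  rcases hall g' hm' with h1 | h1 <;> rcases hall' g hm with h2 | h2 <;> omega

-- B's min(..., key=lambda gs: (k1 gs, -gs)) comparison step, named for the proofs
def lexStep (k1 : Int → Int) (acc : Option Int) (x : Int) : Option Int :=
  match acc with
  | none => some x
  | some m =>
    if (decide (k1 x < k1 m) || !decide (k1 m < k1 x) && decide (-x < -m)) = true
    then some x else some m

theorem lexFold_inv (k1 : Int → Int) (l : List Int) :
    ∀ (m : Int), ∃ g,
      List.foldl (lexStep k1) (some m) l = some g ∧ IsLexMin k1 (m :: l) g := by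
  induction l with
  | nil =>
    intro m
    refine ⟨m, rfl, by simp, ?_⟩
    intro y hy
    simp only [List.mem_cons, List.not_mem_nil, or_false] at hy
    subst hy
    right; exact ⟨rfl, le_refl _⟩
  | cons x t ih =>
    intro m
    rw [List.foldl_cons]
    by_cases hc : k1 x < k1 m ∨ (k1 x ≤ k1 m ∧ m < x)
    · have hstep : lexStep k1 (some m) x = some x := by
        simp only [lexStep]
        split_ifs with h
        · rfl
        · exfalso; simp only [Bool.or_eq_true, Bool.and_eq_true, Bool.not_eq_true',
            decide_eq_true_eq, decide_eq_false_iff_not] at h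
          omega
      obtain ⟨g, hg, hmem, hall⟩ := ih x
      rw [hstep]
      refine ⟨g, hg, ?_, ?_⟩
      · simp only [List.mem_cons] at hmem ⊢; tauto
      · intro y hy
        simp only [List.mem_cons] at hy
        rcases hy with rfl | rfl | hy
        · have h1 := hall x (by simp)
          omega
        · exact hall y (by simp)
        · exact hall y (by simp [hy])
    · have hstep : lexStep k1 (some m) x = some m := by
        simp only [lexStep]
        split_ifs with h
        · exfalso; simp only [Bool.or_eq_true, Bool.and_eq_true, Bool.not_eq_true',
            decide_eq_true_eq, decide_eq_false_iff_not] at h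
          omega
        · rfl
      obtain ⟨g, hg, hmem, hall⟩ := ih m
      rw [hstep]
      refine ⟨g, hg, ?_, ?_⟩
      · simp only [List.mem_cons] at hmem ⊢; tauto
      · intro y hy
        simp only [List.mem_cons] at hy
        rcases hy with rfl | rfl | hy
        · exact hall y (by simp)
        · have h1 := hall m (by simp)
          omega
        · exact hall y (by simp [hy])

theorem min2?_isLexMin (k1 : Int → Int) (l : List Int) (hl : l ≠ []) :
    ∃ g, PySem.List.min2? l k1 (fun x => -x) = some g ∧ IsLexMin k1 l g := by
  obtain ⟨x, t, rfl⟩ := List.exists_cons_of_ne_nil hl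
  have hdef : PySem.List.min2? (x :: t) k1 (fun x => -x) =
      List.foldl (lexStep k1) (some x) t := by
    unfold PySem.List.min2?
    rw [List.foldl_cons]
    congr 1
    funext acc y
    cases acc <;> rfl
  rw [hdef]
  exact lexFold_inv k1 t x
-- one unfolding step of zipLongestChunks on a nonempty list
theorem zipLongestChunks_cons_eq (kpred : Nat) (fill : Int) (xs : List Int) (hxs : xs ≠ []) :
    zipLongestChunks kpred fill xs =
      (xs.take (kpred + 1) ++ List.replicate (kpred + 1 - (xs.take (kpred + 1)).length) fill) ::
        zipLongestChunks kpred fill (xs.drop (kpred + 1)) := by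
  obtain ⟨y, ys, rfl⟩ := List.exists_cons_of_ne_nil hxs
  rw [zipLongestChunks]

theorem as_groups_sel (n : Int) (l : List Int) (hl : l ≠ []) :
    ∃ g,
      (match PySem.List.sorted (selMap n l).keys (fun k => k) false with
        | [] => none
        | lowestDefaultCount :: _ =>
          PySem.List.max? ((selMap n l).getD lowestDefaultCount []) (fun x => x)) = some g ∧
      IsLexMin (fun gs => if PySem.Int.mod n gs = 0 then 0 else gs - PySem.Int.mod n gs) l g := by
  set ck : Int → Int := fun gs => if PySem.Int.mod n gs = 0 then 0 else gs - PySem.Int.mod n gs with hck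
  -- the dict as a fold over (count, size) pairs
  have hmap : selMap n l =
      (l.map (fun gs => (ck gs, gs))).foldl
        (fun d p => d.modify p.1 [] (fun b => b ++ [p.2])) PySem.Dict.empty := by
    rw [List.foldl_map]; rfl
  have hbucket : ∀ c, (selMap n l).getD c [] = l.filter (fun gs => ck gs == c) := by
    intro c
    rw [hmap, PySem.Dict.getD_foldl_modify_append]
    simp [List.filter_map, List.map_map, Function.comp_def]
  have hkeys : ∀ y, y ∈ (selMap n l).keys ↔ ∃ gs ∈ l, ck gs = y := by
    intro y
    have : selMap n l = l.foldl (fun d gs => d.modify (ck gs) []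
        ((fun (_ : PySem.Dict Int (List Int)) (gs : Int) (b : List Int) => b ++ [gs]) d gs)) PySem.Dict.empty := rfl
    rw [this, PySem.Dict.keys_foldl_modify_key]
    constructor
    · intro hy
      have := (PySem.Set.mem_update PySem.Dict.empty.keys (l.map ck) y).mp hy
      simpa using this
    · intro ⟨gs, hgs, hgy⟩
      exact (PySem.Set.mem_update _ _ y).mpr (Or.inr (by exact List.mem_map.mpr ⟨gs, hgs, hgy⟩))
  -- keys nonempty, hence sorted keys nonempty
  obtain ⟨x0, t0, rfl⟩ := List.exists_cons_of_ne_nil hl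
  have hknil : (selMap n (x0 :: t0)).keys ≠ [] := by
    intro h
    have := (hkeys (ck x0)).mpr ⟨x0, by simp, rfl⟩
    rw [h] at this
    exact absurd this (List.not_mem_nil)
  have hsnil : PySem.List.sorted (selMap n (x0 :: t0)).keys (fun k => k) false ≠ [] := by
    rw [Ne, PySem.List.sorted_eq_nil_iff]; exact hknil
  obtain ⟨c, rest, hsk⟩ := List.exists_cons_of_ne_nil hsnil
  rw [hsk]
  -- c is the minimal count and is attained
  have hcmem : c ∈ (selMap n (x0 :: t0)).keys := by
    rw [← PySem.List.mem_sorted _ (fun k => k) false, hsk]; simp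
  have hcmin : ∀ y ∈ (selMap n (x0 :: t0)).keys, c ≤ y :=
    PySem.List.key_head_sorted_le _ (fun k => k) hsk
  obtain ⟨gs0, hgs0mem, hgs0⟩ := (hkeys c).mp hcmem
  -- the bucket is nonempty, so max? returns its maximum
  have hbne : (selMap n (x0 :: t0)).getD c [] ≠ [] := by
    rw [hbucket]
    intro h
    have : gs0 ∈ List.filter (fun gs => ck gs == c) (x0 :: t0) :=
      List.mem_filter.mpr ⟨hgs0mem, by simp [hgs0]⟩
    rw [h] at this
    exact absurd this (List.not_mem_nil)
  rcases hmx : PySem.List.max? ((selMap n (x0 :: t0)).getD c []) (fun x => x) with _ | g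
  · exact absurd ((PySem.List.max?_eq_none_iff _ _).mp hmx) hbne
  refine ⟨g, hmx, ?_, ?_⟩
  · have := PySem.List.max?_mem hmx
    rw [hbucket] at this
    exact (List.mem_filter.mp this).1
  · -- g is the lex minimum
    have hgmem := PySem.List.max?_mem hmx
    rw [hbucket] at hgmem
    have hgck : ck g = c := by simpa using (List.mem_filter.mp hgmem).2
    have hgmax := PySem.List.max?_isMax hmx
    intro y hy
    have hcy : c ≤ ck y := hcmin _ ((hkeys (ck y)).mpr ⟨y, hy, rfl⟩)
    rcases eq_or_lt_of_le hcy with heq | hlt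
    · right
      refine ⟨by omega, ?_⟩
      have hybucket : y ∈ (selMap n (x0 :: t0)).getD c [] := by
        rw [hbucket]
        exact List.mem_filter.mpr ⟨hy, by simp [heq]⟩
      have := hgmax y hybucket
      omega
    · left; omega

theorem pyRange_zero_stop (g : Int) : PySem.List.pyRange 0 0 g = [] := by
  unfold PySem.List.pyRange
  split_ifs <;> simp_all

theorem pyRange_nonpos_nil (n g : Int) (hn : 0 ≤ n) (hg : g ≤ 0) :
    PySem.List.pyRange 0 n g = [] := by
  unfold PySem.List.pyRange
  split_ifs <;> simp_all <;> omega

theorem pyRange_pos_stop_nonpos (m g : Int) (hg : 0 < g) (hm : m ≤ 0) :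
    PySem.List.pyRange 0 m g = [] := by
  rw [PySem.List.pyRange_of_pos _ _ hg, if_neg (by omega)]
  simp

theorem pyRange_pos_shift (n g : Int) (hg : 0 < g) (hn : 0 < n) :
    PySem.List.pyRange 0 n g = 0 :: (PySem.List.pyRange 0 (n - g) g).map (fun i => g + i) := by
  rw [PySem.List.pyRange_of_pos _ _ hg, PySem.List.pyRange_of_pos _ _ hg]
  have hd0 : 0 ≤ (n - 1) / g := Int.ediv_nonneg (by omega) (by omega)
  have hdiv : (n - 0 + g - 1) / g = (n - 1) / g + 1 := by
    rw [show n - 0 + g - 1 = (n - 1) + 1 * g by ring, Int.add_mul_ediv_right _ _ (by omega)]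
  by_cases h2 : 0 < n - g
  · have hdiv2 : (n - g - 0 + g - 1) / g = (n - 1) / g := by ring_nf
    rw [if_pos hn, if_pos h2, hdiv, hdiv2]
    rw [show ((n - 1) / g + 1).toNat = ((n - 1) / g).toNat + 1 by omega, List.range_succ_eq_map]
    simp only [List.map_cons, List.map_map]
    congr 1
    · simp
    · exact List.map_congr_left (fun x _ => by simp [Function.comp]; ring)
  · have hd1 : (n - 1) / g = 0 := Int.ediv_eq_zero_of_lt (by omega) (by omega)
    rw [if_pos hn, if_neg h2, hdiv, hd1]
    simp

theorem slice_map_eq_chunks (g : Int) (hg : 0 < g) (fill : Int) :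
    ∀ (N : Nat) (l : List Int), l.length ≤ N →
      (PySem.List.pyRange 0 (l.length : Int) g).map (fun i =>
        let group := PySem.List.slice l (some i) (some (i + g))
        group ++ List.replicate (g - (group.length : Int)).toNat fill)
      = zipLongestChunks (g.toNat - 1) fill l := by
  intro N
  induction N with
  | zero =>
    intro l hl
    have : l = [] := List.length_eq_zero_iff.mp (by omega)
    subst this
    simp [pyRange_zero_stop, zipLongestChunks]
  | succ N ih =>
    intro l hl
    rcases hl0 : l with _ | ⟨x, xs⟩
    · simp [pyRange_zero_stop, zipLongestChunks]
    rw [← hl0]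
    have hlpos : 0 < l.length := by rw [hl0]; simp
    have hgt : g.toNat - 1 + 1 = g.toNat := by omega
    rw [pyRange_pos_shift _ g hg (by exact_mod_cast hlpos), List.map_cons, List.map_map]
    rw [zipLongestChunks_cons_eq _ _ _ (by rw [hl0]; simp), hgt]
    dsimp only
    congr 1
    · -- head group: l[0 : g]
      rw [zero_add, PySem.List.slice_zero_start, PySem.List.slice_to _ (le_of_lt hg)]
      congr 1
      have h1 : (l.take g.toNat).length = min g.toNat l.length := by simp
      congr 1
      omega
    · -- tail: shift the slices onto l.drop g.toNat and apply the IH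
      have htail : ∀ i ∈ PySem.List.pyRange 0 ((l.length : Int) - g) g,
          (PySem.List.slice l (some (g + i)) (some (g + i + g)) ++
            List.replicate (g - ((PySem.List.slice l (some (g + i)) (some (g + i + g))).length : Int)).toNat fill)
          = (PySem.List.slice (l.drop g.toNat) (some i) (some (i + g)) ++
            List.replicate (g - ((PySem.List.slice (l.drop g.toNat) (some i) (some (i + g))).length : Int)).toNat fill) := by
        intro i hi
        have hi0 : 0 ≤ i := ((PySem.List.mem_pyRange_iff_of_pos hg i).mp hi).1
        have hshift : PySem.List.slice l (some (g + i)) (some (g + i + g))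
            = PySem.List.slice (l.drop g.toNat) (some i) (some (i + g)) := by
          rw [PySem.List.slice_toNat _ (by omega) (by omega),
              PySem.List.slice_toNat _ (by omega) (by omega),
              List.drop_drop]
          congr 1
          · omega
          · congr 1
            omega
        rw [hshift]
      simp only [Function.comp_def]
      rw [List.map_congr_left htail]
      have hrange : PySem.List.pyRange 0 ((l.length : Int) - g) g
          = PySem.List.pyRange 0 (((l.drop g.toNat).length : Int)) g := by
        by_cases h : g ≤ (l.length : Int)
        · congr 1
          simp only [List.length_drop]
          omega
        · rw [pyRange_pos_stop_nonpos ((l.length : Int) - g) g hg (by omega),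
            show (((l.drop g.toNat).length : Int)) = 0 by simp only [List.length_drop]; omega,
            pyRange_pos_stop_nonpos 0 g hg le_rfl]
      rw [hrange]
      have hlen : (l.drop g.toNat).length ≤ N := by
        simp only [List.length_drop]
        omega
      exact ih (l.drop g.toNat) hlen

-- as_groups with its lets/matches named, definitionally
theorem as_groups_eq (sequence : List Int) (group_sizes : List Int) (default : Option Int) :
    as_groups sequence group_sizes default =
      (match PySem.List.sorted (selMap (sequence.length : Int) group_sizes).keys (fun k => k) false with
        | [] => []
        | c :: _ =>
          match PySem.List.max? ((selMap (sequence.length : Int) group_sizes).getD c []) (fun x => x) with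
          | none => []
          | some groupSize =>
            if groupSize ≤ 0 then []
            else zipLongestChunks (groupSize.toNat - 1) (default.getD 0) sequence) := rfl

-- ===== VERDICT (by name: the statement is the Claim_ definition above) =====
theorem as_groups_spec : Claim_equal_as_groups := by
  unfold Claim_equal_as_groups Spec_as_groups
  intro sequence group_sizes default _ hpre
  obtain ⟨hne, hpos, hpad⟩ := hpre
  obtain ⟨g, hA, hlexA⟩ := as_groups_sel (sequence.length : Int) group_sizes hne
  obtain ⟨g', hB, hlexB⟩ := min2?_isLexMin
    (fun gs => if PySem.Int.mod (sequence.length : Int) gs = 0 then 0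
      else gs - PySem.Int.mod (sequence.length : Int) gs) group_sizes hne
  have hgg : g = g' := isLexMin_unique hlexA hlexB
  subst hgg
  rw [as_groups_eq]
  rcases hsk : PySem.List.sorted (selMap (sequence.length : Int) group_sizes).keys (fun k => k) false with _ | ⟨c, rest⟩
  · rw [hsk] at hA; simp at hA
  · rw [hsk] at hA
    simp only at hA ⊢
    rw [hA]
    dsimp only
    show _ = as_groups_alt sequence group_sizes default
    simp only [as_groups_alt]
    rw [hB]
    dsimp only
    by_cases hgle : g ≤ 0
    · rw [if_pos hgle, pyRange_nonpos_nil _ _ (by omega) hgle, List.map_nil]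
    · rw [if_neg hgle]
      exact (slice_map_eq_chunks g (by omega) (default.getD 0) sequence.length sequence le_rfl).symm
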